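-- pv_equiv track=rewrite | github.com/kkr010128/codebert | problem113/problem113_24.py | search
-- ===== SOURCE A (Python) =====
-- def search(day, schedule, c, s, satisfy):
--     score = 0
--     date = [0] * 26
--     for d in range(day):
--         tmp = 0
--         contest = 0
--         nmax = -float('inf')
--         for i in range(26):
--             tmp += c[i] * (d + 1 - date[i])
--         for i in range(26):
--             tmp2 = s[d][i] - tmp + c[i] * (d + 1 - date[i])
--             if nmax < tmp2:
--                 nmax = tmp2
--                 contest = i
--
--         date[contest] = d + 1
--         satisfy.append(tmp - c[contest] * (d + 1 - date[contest]))
--         schedule.append(contest)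
--         score += s[d][contest] - satisfy[d]
--
--     return score
-- ===== SOURCE B (Python) =====
-- def search(day, schedule, c, s, satisfy):
--     # Same mutations as the original: appends one entry per day to satisfy and schedule.
--     score = 0
--     date = [0] * 26
--     sumC = sum(c[:26])
--     P = 0  # running value of sum(c[i] * date[i] for i in range(26))
--     for d in range(day):
--         tmp = (d + 1) * sumC - P
--         row = s[d]
--         contest = 0
--         best = row[0] + c[0] * (d + 1 - date[0])
--         for i in range(1, 26):
--             v = row[i] + c[i] * (d + 1 - date[i])
--             if best < v:
--                 best = v
--                 contest = i
--         P += c[contest] * (d + 1 - date[contest])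
--         date[contest] = d + 1
--         satisfy.append(tmp)
--         schedule.append(contest)
--         score += row[contest] - satisfy[d]
--     return score
-- ===== Notes on version B (the rewrite author's own statement) =====
-- stated objective: alternative
-- what changed: Replaces the per-day 26-iteration penalty recomputation with a running sum P of c[i]*date[i] maintained incrementally (penalty = (d+1)*sum(c[:26]) - P), and merges the two inner loops into a single argmax scan over the unshifted value s[d][i] + c[i]*(d+1-date[i]) seeded from index 0 instead of a -inf sentinel.
import Mathlib
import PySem

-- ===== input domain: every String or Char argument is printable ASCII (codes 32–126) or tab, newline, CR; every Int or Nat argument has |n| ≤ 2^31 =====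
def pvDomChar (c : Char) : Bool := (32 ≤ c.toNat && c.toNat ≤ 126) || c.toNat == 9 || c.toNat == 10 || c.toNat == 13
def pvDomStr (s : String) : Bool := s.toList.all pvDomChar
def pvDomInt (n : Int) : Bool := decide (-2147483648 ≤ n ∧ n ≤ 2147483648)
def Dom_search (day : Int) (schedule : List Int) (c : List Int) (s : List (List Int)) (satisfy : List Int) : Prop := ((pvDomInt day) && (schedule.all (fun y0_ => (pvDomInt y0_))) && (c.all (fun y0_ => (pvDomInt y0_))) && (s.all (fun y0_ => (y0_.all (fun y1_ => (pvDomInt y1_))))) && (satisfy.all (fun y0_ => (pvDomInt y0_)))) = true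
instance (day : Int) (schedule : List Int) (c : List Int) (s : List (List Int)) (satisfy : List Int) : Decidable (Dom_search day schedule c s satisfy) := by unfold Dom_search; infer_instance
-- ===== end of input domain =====

-- B maintains the day's penalty as a running sum instead of recomputing it in a separate 26-element
-- loop, and selects the contest in one seeded argmax scan; return-value equivalence (both mutate
-- schedule/satisfy identically in Python, the appended values are the same).


-- ===== PORT A =====
-- one iteration of A's 'for d in range(day)' body; state = (score, date, satisfy)
def searchStepA (c : List Int) (s : List (List Int)) (st : Int × List Int × List Int) (d : Int) : Int × List Int × List Int :=
  let score := st.1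
  let date := st.2.1
  let satisfy := st.2.2
  let tmp := (PySem.List.pyRange 0 26 1).foldl
    (fun t i => t + PySem.List.pyGetD c i 0 * (d + 1 - PySem.List.pyGetD date i 0)) 0
  -- nmax starts at -float('inf'): encoded as 'none', strictly below every integer tmp2
  let sel := (PySem.List.pyRange 0 26 1).foldl
    (fun (p : Int × Option Int) i =>
      let tmp2 := PySem.List.pyGetD (PySem.List.pyGetD s d []) i 0 - tmp
                  + PySem.List.pyGetD c i 0 * (d + 1 - PySem.List.pyGetD date i 0)
      match p.2 with
      | none => (i, some tmp2)
      | some m => if m < tmp2 then (i, some tmp2) else p)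
    ((0 : Int), (none : Option Int))
  let contest := sel.1
  let date' := PySem.List.pySetD date contest (d + 1)
  let satisfy' := satisfy ++ [tmp - PySem.List.pyGetD c contest 0 * (d + 1 - PySem.List.pyGetD date' contest 0)]
  (score + (PySem.List.pyGetD (PySem.List.pyGetD s d []) contest 0 - PySem.List.pyGetD satisfy' d 0), date', satisfy')

def search (day : Int) (schedule : List Int) (c : List Int) (s : List (List Int)) (satisfy : List Int) : Int :=
  ((PySem.List.pyRange 0 day 1).foldl (searchStepA c s) (0, List.replicate 26 0, satisfy)).1

-- ===== PORT B =====
-- one iteration of B's loop body; state = (score, date, satisfy, P)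
def searchStepB (c : List Int) (sumC : Int) (s : List (List Int)) (st : Int × List Int × List Int × Int) (d : Int) : Int × List Int × List Int × Int :=
  let score := st.1
  let date := st.2.1
  let satisfy := st.2.2.1
  let P := st.2.2.2
  let tmp := (d + 1) * sumC - P
  let row := PySem.List.pyGetD s d []
  let sel := (PySem.List.pyRange 1 26 1).foldl
    (fun (p : Int × Int) i =>
      let v := PySem.List.pyGetD row i 0 + PySem.List.pyGetD c i 0 * (d + 1 - PySem.List.pyGetD date i 0)
      if p.2 < v then (i, v) else p)
    ((0 : Int), PySem.List.pyGetD row 0 0 + PySem.List.pyGetD c 0 0 * (d + 1 - PySem.List.pyGetD date 0 0))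
  let contest := sel.1
  let P' := P + PySem.List.pyGetD c contest 0 * (d + 1 - PySem.List.pyGetD date contest 0)
  let date' := PySem.List.pySetD date contest (d + 1)
  let satisfy' := satisfy ++ [tmp]
  (score + (PySem.List.pyGetD row contest 0 - PySem.List.pyGetD satisfy' d 0), date', satisfy', P')

def search_alt (day : Int) (schedule : List Int) (c : List Int) (s : List (List Int)) (satisfy : List Int) : Int :=
  ((PySem.List.pyRange 0 day 1).foldl
    (searchStepB c ((PySem.List.slice c none (some 26)).sum) s)
    (0, List.replicate 26 0, satisfy, 0)).1

-- ===== PRECONDITION & SPEC =====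
-- Pre_ excludes exactly the inputs where Python A raises IndexError: when any day of the loop runs,
-- c must have ≥ 26 entries, s must have a row for each day, and each used row ≥ 26 entries.
def Pre_search (day : Int) (schedule : List Int) (c : List Int) (s : List (List Int)) (satisfy : List Int) : Prop :=
  day ≤ 0 ∨ (26 ≤ c.length ∧ day ≤ (s.length : Int) ∧ ∀ r ∈ s.take day.toNat, 26 ≤ r.length)
instance (day : Int) (schedule : List Int) (c : List Int) (s : List (List Int)) (satisfy : List Int) : Decidable (Pre_search day schedule c s satisfy) := by unfold Pre_search; infer_instance

def pvWitness_search : Int × List Int × List Int × List (List Int) × List Int :=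
  (1, [], [0, 0, 0, 0, 0, 0, 0, 0, 0, 0, 0, 0, 0, 0, 0, 0, 0, 0, 0, 0, 0, 0, 0, 0, 0, 0],
   [[1, 0, 0, 0, 0, 0, 0, 0, 0, 0, 0, 0, 0, 0, 0, 0, 0, 0, 0, 0, 0, 0, 0, 0, 0, 0]], [])

def Spec_search (day : Int) (schedule : List Int) (c : List Int) (s : List (List Int)) (satisfy : List Int) (out : Int) : Prop := out = search_alt day schedule c s satisfy
instance (day : Int) (schedule : List Int) (c : List Int) (s : List (List Int)) (satisfy : List Int) (out : Int) : Decidable (Spec_search day schedule c s satisfy out) := by unfold Spec_search; infer_instance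

-- ===== CLAIM (what is proved, stated in full; the proofs are below) =====
def Claim_equal_search : Prop := ∀ (day : Int) (schedule : List Int) (c : List Int) (s : List (List Int)) (satisfy : List Int), Dom_search day schedule c s satisfy → Pre_search day schedule c s satisfy → Spec_search day schedule c s satisfy (search day schedule c s satisfy)

-- ===== LEMMAS AND PROOFS =====

def pvG (xs : List Int) (k : Nat) : Int := xs.getD k 0
def pvC (c : List Int) (n : Nat) : Int := ((List.range n).map (fun k => pvG c k)).sum
def pvS (c date : List Int) (n : Nat) : Int := ((List.range n).map (fun k => pvG c k * pvG date k)).sum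

theorem pvC_eq_take (c : List Int) (n : Nat) : pvC c n = (c.take n).sum := by
  induction n with
  | zero => simp [pvC]
  | succ n ih =>
    unfold pvC at *
    rw [List.range_succ, List.map_append, List.sum_append, ih, List.take_succ,
        List.sum_append]
    by_cases hn : n < c.length
    · simp [pvG, List.getD, List.getElem?_eq_getElem hn]
    · simp [pvG, List.getD, List.getElem?_eq_none (show c.length ≤ n by omega)]

theorem tmpA_eq (c date : List Int) (d : Int) (n : Nat) (t : Int) :
    (PySem.List.pyRange 0 (n : Int) 1).foldl
      (fun t i => t + PySem.List.pyGetD c i 0 * (d + 1 - PySem.List.pyGetD date i 0)) t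
    = t + (d + 1) * pvC c n - pvS c date n := by
  induction n generalizing t with
  | zero => simp [pvC, pvS, PySem.List.pyRange_one_eq_nil]
  | succ n ih =>
    rw [show ((n + 1 : Nat) : Int) = (n : Int) + 1 by push_cast; ring,
        PySem.List.pyRange_one_succ_right (by positivity), List.foldl_append]
    simp only [List.foldl_cons, List.foldl_nil, ih]
    unfold pvC pvS
    rw [List.range_succ]
    simp [pvG]
    ring

theorem pvG_set_ne (date : List Int) (j k : Nat) (v : Int) (h : j ≠ k) :
    pvG (date.set j v) k = pvG date k := by
  simp [pvG, List.getD, h]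

theorem pvG_set_self (date : List Int) (j : Nat) (v : Int) (hj : j < date.length) :
    pvG (date.set j v) j = v := by
  simp [pvG, List.getD, hj]

theorem pvS_set (c date : List Int) (j : Nat) (v : Int) (hj : j < date.length) (n : Nat) (hn : j < n) :
    pvS c (date.set j v) n = pvS c date n + pvG c j * (v - pvG date j) := by
  induction n with
  | zero => omega
  | succ n ih =>
    unfold pvS at *
    rw [List.range_succ, List.map_append, List.sum_append, List.map_append, List.sum_append]
    simp only [List.map_cons, List.map_nil, List.sum_cons, List.sum_nil]
    by_cases h : j < n
    · rw [ih h, pvG_set_ne date j n v (by omega)]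
      ring
    · have hjn : j = n := by omega
      subst hjn
      have hpre : (List.range j).map (fun k => pvG c k * pvG (date.set j v) k)
          = (List.range j).map (fun k => pvG c k * pvG date k) := by
        apply List.map_congr_left
        intro k hk
        rw [pvG_set_ne date j k v (by simp at hk; omega)]
      rw [hpre, pvG_set_self date j v hj]
      ring

-- A's argmax fold (carrying 'value - tmp' in an Option) tracks B's fold (carrying the raw value)
theorem sel_rel (g : Int → Int) (tmp : Int) (l : List Int) (q : Int × Int) :
    l.foldl (fun (p : Int × Option Int) i =>
        match p.2 with
        | none => (i, some (g i - tmp))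
        | some m => if m < g i - tmp then (i, some (g i - tmp)) else p) (q.1, some (q.2 - tmp))
    = ((l.foldl (fun (p : Int × Int) i => if p.2 < g i then (i, g i) else p) q).1,
       some ((l.foldl (fun (p : Int × Int) i => if p.2 < g i then (i, g i) else p) q).2 - tmp)) := by
  induction l generalizing q with
  | nil => rfl
  | cons i l ih =>
    simp only [List.foldl_cons]
    by_cases h : q.2 < g i
    · rw [if_pos (by omega), if_pos h]
      exact ih (i, g i)
    · rw [if_neg (by omega), if_neg h]
      exact ih q

theorem sel_fst_mem (g : Int → Int) (l : List Int) (q : Int × Int) :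
    (l.foldl (fun (p : Int × Int) i => if p.2 < g i then (i, g i) else p) q).1 = q.1
    ∨ (l.foldl (fun (p : Int × Int) i => if p.2 < g i then (i, g i) else p) q).1 ∈ l := by
  induction l generalizing q with
  | nil => simp
  | cons i l ih =>
    simp only [List.foldl_cons]
    by_cases h : q.2 < g i
    · rw [if_pos h]
      rcases ih (i, g i) with h1 | h1
      · right; simp [h1]
      · right; simp [h1]
    · rw [if_neg h]
      rcases ih q with h1 | h1
      · left; exact h1
      · right; simp [h1]

-- named subterms of the two step functions (proof-layer only)
def rowT (s : List (List Int)) (d : Int) : List Int := PySem.List.pyGetD s d []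
def tmpA (c date : List Int) (d : Int) : Int :=
  (PySem.List.pyRange 0 26 1).foldl
    (fun t i => t + PySem.List.pyGetD c i 0 * (d + 1 - PySem.List.pyGetD date i 0)) 0
def gsel (c row date : List Int) (d i : Int) : Int :=
  PySem.List.pyGetD row i 0 + PySem.List.pyGetD c i 0 * (d + 1 - PySem.List.pyGetD date i 0)
def selA (c row date : List Int) (d tmp : Int) : Int × Option Int :=
  (PySem.List.pyRange 0 26 1).foldl
    (fun (p : Int × Option Int) i =>
      match p.2 with
      | none => (i, some (PySem.List.pyGetD row i 0 - tmp
                  + PySem.List.pyGetD c i 0 * (d + 1 - PySem.List.pyGetD date i 0)))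
      | some m => if m < PySem.List.pyGetD row i 0 - tmp
                  + PySem.List.pyGetD c i 0 * (d + 1 - PySem.List.pyGetD date i 0)
                  then (i, some (PySem.List.pyGetD row i 0 - tmp
                  + PySem.List.pyGetD c i 0 * (d + 1 - PySem.List.pyGetD date i 0))) else p)
    ((0 : Int), (none : Option Int))
def selB (c row date : List Int) (d : Int) : Int × Int :=
  (PySem.List.pyRange 1 26 1).foldl
    (fun (p : Int × Int) i =>
      if p.2 < gsel c row date d i then (i, gsel c row date d i) else p)
    ((0 : Int), gsel c row date d 0)
def contA (c : List Int) (s : List (List Int)) (date : List Int) (d : Int) : Int :=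
  (selA c (rowT s d) date d (tmpA c date d)).1
def contB (c : List Int) (s : List (List Int)) (date : List Int) (d : Int) : Int :=
  (selB c (rowT s d) date d).1
def appA (c : List Int) (s : List (List Int)) (date : List Int) (d : Int) : Int :=
  tmpA c date d - PySem.List.pyGetD c (contA c s date d) 0 *
    (d + 1 - PySem.List.pyGetD (PySem.List.pySetD date (contA c s date d) (d + 1)) (contA c s date d) 0)

theorem stepA_eq (c : List Int) (s : List (List Int)) (score : Int) (date satisfy : List Int) (d : Int) :
    searchStepA c s (score, date, satisfy) d
      = (score + (PySem.List.pyGetD (rowT s d) (contA c s date d) 0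
                   - PySem.List.pyGetD (satisfy ++ [appA c s date d]) d 0),
         PySem.List.pySetD date (contA c s date d) (d + 1),
         satisfy ++ [appA c s date d]) := rfl

theorem stepB_eq (c : List Int) (sumC : Int) (s : List (List Int)) (score : Int)
    (date satisfy : List Int) (P d : Int) :
    searchStepB c sumC s (score, date, satisfy, P) d
      = (score + (PySem.List.pyGetD (rowT s d) (contB c s date d) 0
                   - PySem.List.pyGetD (satisfy ++ [(d + 1) * sumC - P]) d 0),
         PySem.List.pySetD date (contB c s date d) (d + 1),
         satisfy ++ [(d + 1) * sumC - P],
         P + PySem.List.pyGetD c (contB c s date d) 0 *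
             (d + 1 - PySem.List.pyGetD date (contB c s date d) 0)) := rfl

theorem tmpA_val (c date : List Int) (d : Int) :
    tmpA c date d = (d + 1) * pvC c 26 - pvS c date 26 := by
  have h := tmpA_eq c date d 26 0
  unfold tmpA
  norm_num at h
  simpa using h

theorem selA_val (c row date : List Int) (d tmp : Int) :
    selA c row date d tmp
      = ((selB c row date d).1, some ((selB c row date d).2 - tmp)) := by
  unfold selA selB
  rw [show PySem.List.pyRange 0 26 1 = 0 :: PySem.List.pyRange 1 26 1 from
      PySem.List.pyRange_one_cons (by norm_num)]
  rw [List.foldl_cons]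
  have h0 : ∀ i : Int, PySem.List.pyGetD row i 0 - tmp
      + PySem.List.pyGetD c i 0 * (d + 1 - PySem.List.pyGetD date i 0)
      = gsel c row date d i - tmp := by
    intro i; unfold gsel; ring
  simp only [h0]
  exact sel_rel (gsel c row date d) tmp (PySem.List.pyRange 1 26 1) (0, gsel c row date d 0)

theorem cont_eq (c : List Int) (s : List (List Int)) (date : List Int) (d : Int) :
    contA c s date d = contB c s date d := by
  unfold contA contB
  rw [selA_val]

theorem contB_bounds (c : List Int) (s : List (List Int)) (date : List Int) (d : Int) :
    0 ≤ contB c s date d ∧ contB c s date d < 26 := by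
  unfold contB selB
  rcases sel_fst_mem (gsel c (rowT s d) date d) (PySem.List.pyRange 1 26 1)
      (0, gsel c (rowT s d) date d 0) with h | h
  · simp only [h]; norm_num
  · rw [PySem.List.mem_pyRange_one] at h
    omega

theorem pySetD_eq_set (date : List Int) (j v : Int) (h0 : 0 ≤ j) (h1 : j < (date.length : Int)) :
    PySem.List.pySetD date j v = date.set j.toNat v := by
  rw [show j = ((j.toNat : Nat) : Int) by omega]
  unfold PySem.List.pySetD
  rw [PySem.List.pySet?_natCast date j.toNat v (by omega)]
  rfl

theorem pyGetD_eq_pvG (xs : List Int) (j : Int) (h0 : 0 ≤ j) :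
    PySem.List.pyGetD xs j 0 = pvG xs j.toNat := by
  rw [show j = ((j.toNat : Nat) : Int) by omega, PySem.List.pyGetD_natCast]
  rfl

theorem step_rel (c : List Int) (s : List (List Int)) (sumC : Int) (hC : sumC = pvC c 26)
    (d score : Int) (date satisfy : List Int) (P : Int) (hP : P = pvS c date 26)
    (hlen : date.length = 26) :
    searchStepA c s (score, date, satisfy) d
      = ((searchStepB c sumC s (score, date, satisfy, P) d).1,
         (searchStepB c sumC s (score, date, satisfy, P) d).2.1,
         (searchStepB c sumC s (score, date, satisfy, P) d).2.2.1)
    ∧ (searchStepB c sumC s (score, date, satisfy, P) d).2.2.2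
        = pvS c (searchStepB c sumC s (score, date, satisfy, P) d).2.1 26
    ∧ (searchStepB c sumC s (score, date, satisfy, P) d).2.1.length = 26 := by
  obtain ⟨hj0, hj26⟩ := contB_bounds c s date d
  have hjlen : contB c s date d < (date.length : Int) := by rw [hlen]; exact_mod_cast hj26
  have hjnat : (contB c s date d).toNat < date.length := by omega
  have htmp : tmpA c date d = (d + 1) * sumC - P := by
    rw [tmpA_val, hC, hP]
  have happ : appA c s date d = (d + 1) * sumC - P := by
    unfold appA
    rw [cont_eq, pySetD_eq_set date _ _ hj0 hjlen, pyGetD_eq_pvG c _ hj0,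
        pyGetD_eq_pvG (date.set (contB c s date d).toNat (d + 1)) _ hj0,
        pvG_set_self date _ _ hjnat, htmp]
    ring
  refine ⟨?_, ?_, ?_⟩
  · rw [stepA_eq, stepB_eq, cont_eq, happ]
  · rw [stepB_eq]
    simp only
    rw [pySetD_eq_set date _ _ hj0 hjlen,
        pvS_set c date _ _ hjnat 26 (by omega),
        pyGetD_eq_pvG c _ hj0, pyGetD_eq_pvG date _ hj0, hP]
  · rw [stepB_eq]
    simp only
    rw [pySetD_eq_set date _ _ hj0 hjlen]
    simp [hlen]

-- loop invariant carried through the whole day-fold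
theorem fold_rel (c : List Int) (s : List (List Int)) (sumC : Int) (hC : sumC = pvC c 26)
    (l : List Int) :
    ∀ (score : Int) (date satisfy : List Int) (P : Int), P = pvS c date 26 → date.length = 26 →
    l.foldl (searchStepA c s) (score, date, satisfy)
      = ((l.foldl (searchStepB c sumC s) (score, date, satisfy, P)).1,
         (l.foldl (searchStepB c sumC s) (score, date, satisfy, P)).2.1,
         (l.foldl (searchStepB c sumC s) (score, date, satisfy, P)).2.2.1) := by
  induction l with
  | nil => intro score date satisfy P hP hlen; rfl
  | cons d l ih =>
    intro score date satisfy P hP hlen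
    obtain ⟨h1, h2, h3⟩ := step_rel c s sumC hC d score date satisfy P hP hlen
    simp only [List.foldl_cons, h1]
    have := ih (searchStepB c sumC s (score, date, satisfy, P) d).1
      (searchStepB c sumC s (score, date, satisfy, P) d).2.1
      (searchStepB c sumC s (score, date, satisfy, P) d).2.2.1
      (searchStepB c sumC s (score, date, satisfy, P) d).2.2.2 h2 h3
    simpa using this

theorem sumC_slice (c : List Int) : (PySem.List.slice c none (some 26)).sum = pvC c 26 := by
  rw [pvC_eq_take]
  have h := PySem.List.slice_to_natCast (xs := c) (b := 26)
  norm_num at h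
  rw [h]

theorem pvS_replicate (c : List Int) : pvS c (List.replicate 26 0) 26 = 0 := by
  unfold pvS
  have h : ∀ k ∈ List.range 26, pvG c k * pvG (List.replicate 26 (0 : Int)) k = 0 := by
    intro k hk
    have h0 : pvG (List.replicate 26 (0 : Int)) k = 0 := by
      unfold pvG List.getD
      rw [List.getElem?_replicate]
      split <;> rfl
    rw [h0]; ring
  rw [List.map_congr_left h]
  simp

-- ===== VERDICT (by name: the statement is the Claim_ definition above) =====
theorem search_spec : Claim_equal_search := by
  intro day schedule c s satisfy _ _
  unfold Spec_search search search_alt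
  have h := fold_rel c s ((PySem.List.slice c none (some 26)).sum) (sumC_slice c)
    (PySem.List.pyRange 0 day 1) 0 (List.replicate 26 0) satisfy 0
    (pvS_replicate c).symm (by simp)
  rw [h]
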